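-- pv_equiv track=rewrite | github.com/KaelZhang321/AI-Business-Platform | ai-gateway/app/services/health_quadrant_service.py | _normalize_single_exam_items
-- ===== SOURCE A (Python) =====
-- from typing import Any
--
-- def _normalize_single_exam_items(items: list[dict[str, Any]]) -> list[dict[str, str]]:
--     """规范化单项体检列表。
--
--     功能：
--         前端可能提交空对象、重复条目或不同字段大小写。这里统一折叠成标准形状，
--         避免进入持久化维度后出现“语义相同但命中失败”。
--     """
--
--     normalized: list[dict[str, str]] = []
--     seen: set[tuple[str, str, str]] = set()
--     for raw in items:
--         item_id = _normalize_text(raw.get("itemId") if isinstance(raw, dict) else None) or ""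
--         item_text = _normalize_text(raw.get("itemText") if isinstance(raw, dict) else None) or ""
--         abnormal_indicator = _normalize_text(raw.get("abnormalIndicator") if isinstance(raw, dict) else None) or ""
--         if not item_id and not item_text and not abnormal_indicator:
--             continue
--         key = (item_id, item_text, abnormal_indicator)
--         if key in seen:
--             continue
--         seen.add(key)
--         normalized.append(
--             {
--                 "itemId": item_id,
--                 "itemText": item_text,
--                 "abnormalIndicator": abnormal_indicator,
--             }
--         )
--     normalized.sort(key=lambda x: (x["itemId"], x["itemText"], x["abnormalIndicator"]))
--     return normalized
--
-- def _normalize_text(value: Any) -> str | None: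
--     if value is None:
--         return None
--     text = str(value).strip()
--     return text or None
-- ===== SOURCE B (Python) =====
-- def _normalize_single_exam_items(items):
--     triples = []
--     for raw in items:
--         item_id = _normalize_text(raw.get("itemId") if isinstance(raw, dict) else None) or ""
--         item_text = _normalize_text(raw.get("itemText") if isinstance(raw, dict) else None) or ""
--         abnormal_indicator = _normalize_text(raw.get("abnormalIndicator") if isinstance(raw, dict) else None) or ""
--         if item_id or item_text or abnormal_indicator:
--             triples.append((item_id, item_text, abnormal_indicator))
--     triples.sort()
--     result = []
--     prev = None
--     for t in triples:
--         if t != prev: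
--             result.append({"itemId": t[0], "itemText": t[1], "abnormalIndicator": t[2]})
--             prev = t
--     return result
--
-- def _normalize_text(value):
--     if value is None:
--         return None
--     text = str(value).strip()
--     return text or None
-- ===== Notes on version B (the rewrite author's own statement) =====
-- stated objective: alternative
-- what changed: Replaces A's seen-set dedup during collection followed by a keyed sort of dicts with: collect normalized triples, sort them, then one adjacent-dedup pass that builds the output dicts.
import Mathlib
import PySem

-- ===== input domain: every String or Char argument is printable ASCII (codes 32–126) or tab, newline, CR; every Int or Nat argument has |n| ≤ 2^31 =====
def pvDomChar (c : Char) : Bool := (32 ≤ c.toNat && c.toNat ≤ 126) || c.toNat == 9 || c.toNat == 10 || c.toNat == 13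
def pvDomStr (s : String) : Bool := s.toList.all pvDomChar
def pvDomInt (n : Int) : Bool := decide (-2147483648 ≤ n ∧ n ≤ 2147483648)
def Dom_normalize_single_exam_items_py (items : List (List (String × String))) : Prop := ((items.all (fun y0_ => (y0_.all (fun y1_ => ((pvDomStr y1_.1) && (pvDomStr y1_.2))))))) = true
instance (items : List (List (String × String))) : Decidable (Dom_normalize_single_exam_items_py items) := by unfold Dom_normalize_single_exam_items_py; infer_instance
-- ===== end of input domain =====

-- B replaces A's seen-set dedup during collection + keyed sort of dicts by: collect triples,
-- sort them, then one adjacent-dedup pass building the output dicts (alternative decomposition, same cost).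

-- Normalized triple of field values and lexicographic key type (Python compares str 3-tuples lexicographically;
-- Lean's String '<' is the same code-point lexicographic order).
abbrev PvT := String × String × String
abbrev PvK := Lex (String × Lex (String × String))

-- _normalize_text(raw.get(k)) or "": exact because str(v) = v on str, strip "" = "" and the
-- 'or' chains collapse None and "" to "" (isinstance(raw, dict) always holds under the type convention).
def pvField (raw : List (String × String)) (k : String) : String :=
  PySem.Str.strip (((PySem.Dict.mk raw).get? k).getD "")

def pvNorm (raw : List (String × String)) : PvT :=
  (pvField raw "itemId", pvField raw "itemText", pvField raw "abnormalIndicator")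

def pvToDict (t : PvT) : List (String × String) :=
  [("itemId", t.1), ("itemText", t.2.1), ("abnormalIndicator", t.2.2)]

-- A's sort key x["itemId"], x["itemText"], x["abnormalIndicator"]: .getD "" is exact here because
-- every dict the loop built contains all three keys (so Python's d[k] never raises).
def pvKeyA (d : List (String × String)) : PvK :=
  toLex (((PySem.Dict.mk d).get? "itemId").getD "",
    toLex (((PySem.Dict.mk d).get? "itemText").getD "",
           ((PySem.Dict.mk d).get? "abnormalIndicator").getD ""))

-- ===== PORT A =====
-- loop body of A's for-loop (skip all-empty, skip seen, else append dict and record key)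
def pvStepA (st : List (List (String × String)) × PySem.Set PvT) (raw : List (String × String)) :
    List (List (String × String)) × PySem.Set PvT :=
  let item_id := pvField raw "itemId"
  let item_text := pvField raw "itemText"
  let abnormal_indicator := pvField raw "abnormalIndicator"
  if item_id = "" ∧ item_text = "" ∧ abnormal_indicator = "" then st
  else
    let key : PvT := (item_id, item_text, abnormal_indicator)
    if PySem.Set.contains st.2 key then st
    else (st.1 ++ [pvToDict key], PySem.Set.add st.2 key)

def normalize_single_exam_items_py (items : List (List (String × String))) : List (List (String × String)) :=
  let st := items.foldl pvStepA ([], PySem.Set.empty)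
  PySem.List.sorted st.1 pvKeyA false

-- ===== PORT B =====
def pvKey3 (t : PvT) : PvK := toLex (t.1, toLex (t.2.1, t.2.2))

-- loop body of B's dedup pass: emit the dict unless t equals the previously emitted triple
def pvStepB (st : List (List (String × String)) × Option PvT) (t : PvT) :
    List (List (String × String)) × Option PvT :=
  if st.2 = some t then st else (st.1 ++ [pvToDict t], some t)

def normalize_single_exam_items_py_alt (items : List (List (String × String))) : List (List (String × String)) :=
  let triples := items.foldl
    (fun acc raw =>
      let t := pvNorm raw
      if t.1 = "" ∧ t.2.1 = "" ∧ t.2.2 = "" then acc else acc ++ [t]) []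
  let sortedT := PySem.List.sorted triples pvKey3 false
  (sortedT.foldl pvStepB ([], none)).1

-- ===== PRECONDITION & SPEC =====
def Spec_normalize_single_exam_items_py (items : List (List (String × String))) (out : List (List (String × String))) : Prop := out = normalize_single_exam_items_py_alt items
instance (items : List (List (String × String))) (out : List (List (String × String))) : Decidable (Spec_normalize_single_exam_items_py items out) := by unfold Spec_normalize_single_exam_items_py; infer_instance

-- ===== CLAIM (what is proved, stated in full; the proofs are below) =====
def Claim_equal_normalize_single_exam_items_py : Prop := ∀ (items : List (List (String × String))), Dom_normalize_single_exam_items_py items → Spec_normalize_single_exam_items_py items (normalize_single_exam_items_py items)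

-- ===== LEMMAS AND PROOFS =====

-- kept normalized triples, in input order (filter of the loop)
def pvTri : List (List (String × String)) → List PvT
  | [] => []
  | r :: l => if pvNorm r = ("", "", "") then pvTri l else pvNorm r :: pvTri l

-- adjacent dedup (B's second pass, on the triple level)
def pvDD : Option PvT → List PvT → List PvT
  | _, [] => []
  | prev, t :: ts => if prev = some t then pvDD prev ts else t :: pvDD (some t) ts

theorem pvKeyA_toDict (t : PvT) : pvKeyA (pvToDict t) = pvKey3 t := by
  rfl

theorem pvKey3_inj : Function.Injective pvKey3 := by
  intro a b h
  simp only [pvKey3, toLex_inj, Prod.ext_iff] at h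
  exact Prod.ext h.1 (Prod.ext h.2.1 h.2.2)

theorem pvStepA_skip (st : List (List (String × String)) × PySem.Set PvT) (raw : List (String × String))
    (hz : pvNorm raw = ("", "", "")) : pvStepA st raw = st := by
  have h1 : pvField raw "itemId" = "" := congrArg Prod.fst hz
  have h2 : pvField raw "itemText" = "" := congrArg (fun t => t.2.1) hz
  have h3 : pvField raw "abnormalIndicator" = "" := congrArg (fun t => t.2.2) hz
  simp [pvStepA, h1, h2, h3]

theorem pvStepA_keep (st : List (List (String × String)) × PySem.Set PvT) (raw : List (String × String))
    (hz : ¬ pvNorm raw = ("", "", "")) :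
    pvStepA st raw = if PySem.Set.contains st.2 (pvNorm raw) then st
      else (st.1 ++ [pvToDict (pvNorm raw)], PySem.Set.add st.2 (pvNorm raw)) := by
  have hz' : ¬ (pvField raw "itemId" = "" ∧ pvField raw "itemText" = "" ∧ pvField raw "abnormalIndicator" = "") := by
    intro h; exact hz (Prod.ext h.1 (Prod.ext h.2.1 h.2.2))
  simp only [pvStepA, if_neg hz']
  rfl

theorem pvA_loop (l : List (List (String × String))) (s : PySem.Set PvT) :
    l.foldl pvStepA (s.map pvToDict, s)
    = ((PySem.Set.update s (pvTri l)).map pvToDict, PySem.Set.update s (pvTri l)) := by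
  induction l generalizing s with
  | nil => simp [pvTri, PySem.Set.update]
  | cons r l ih =>
    simp only [List.foldl_cons, pvTri]
    by_cases hz : pvNorm r = ("", "", "")
    · rw [if_pos hz, pvStepA_skip _ _ hz]
      exact ih s
    · rw [if_neg hz, pvStepA_keep _ _ hz]
      have hupd : PySem.Set.update s (pvNorm r :: pvTri l)
          = PySem.Set.update (PySem.Set.add s (pvNorm r)) (pvTri l) := rfl
      by_cases hc : PySem.Set.contains s (pvNorm r) = true
      · have hadd : PySem.Set.add s (pvNorm r) = s := by
          unfold PySem.Set.add
          rw [if_pos hc]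
        rw [if_pos hc, hupd, hadd]
        exact ih s
      · have hadd : PySem.Set.add s (pvNorm r) = s ++ [pvNorm r] := by
          unfold PySem.Set.add
          rw [if_neg hc]
        rw [if_neg hc, hupd]
        have hmap : (s.map pvToDict) ++ [pvToDict (pvNorm r)] = (PySem.Set.add s (pvNorm r)).map pvToDict := by
          rw [hadd]; simp
        rw [hmap]
        exact ih (PySem.Set.add s (pvNorm r))

theorem pvA_eq (items : List (List (String × String))) :
    normalize_single_exam_items_py items
      = PySem.List.sorted ((PySem.Set.ofList (pvTri items)).map pvToDict) pvKeyA false := by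
  unfold normalize_single_exam_items_py
  have h0 : (([], PySem.Set.empty) : List (List (String × String)) × PySem.Set PvT)
      = ((PySem.Set.empty : PySem.Set PvT).map pvToDict, (PySem.Set.empty : PySem.Set PvT)) := by
    simp [PySem.Set.empty]
  rw [h0, pvA_loop items PySem.Set.empty]
  have : PySem.Set.update (PySem.Set.empty : PySem.Set PvT) (pvTri items) = PySem.Set.ofList (pvTri items) := by
    simp [PySem.Set.update, PySem.Set.ofList_eq_foldl, PySem.Set.empty]
  rw [this]

theorem pvB_tri (l : List (List (String × String))) (acc : List PvT) :
    l.foldl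
      (fun acc raw =>
        let t := pvNorm raw
        if t.1 = "" ∧ t.2.1 = "" ∧ t.2.2 = "" then acc else acc ++ [t]) acc
    = acc ++ pvTri l := by
  induction l generalizing acc with
  | nil => simp [pvTri]
  | cons r l ih =>
    simp only [List.foldl_cons, pvTri]
    by_cases hz : pvNorm r = ("", "", "")
    · have hz' : (pvNorm r).1 = "" ∧ (pvNorm r).2.1 = "" ∧ (pvNorm r).2.2 = "" := by
        rw [hz]; exact ⟨rfl, rfl, rfl⟩
      simp only [hz]
      exact ih acc
    · have hz' : ¬ ((pvNorm r).1 = "" ∧ (pvNorm r).2.1 = "" ∧ (pvNorm r).2.2 = "") := by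
        intro h; exact hz (Prod.ext h.1 (Prod.ext h.2.1 h.2.2))
      simp only [hz, if_neg hz', if_false]
      rw [ih (acc ++ [pvNorm r])]
      simp

theorem pvB_dd (l : List PvT) (out : List (List (String × String))) (prev : Option PvT) :
    (l.foldl pvStepB (out, prev)).1 = out ++ (pvDD prev l).map pvToDict := by
  induction l generalizing out prev with
  | nil => simp [pvDD]
  | cons t ts ih =>
    simp only [List.foldl_cons, pvDD]
    by_cases h : prev = some t
    · rw [if_pos h, show pvStepB (out, prev) t = (out, prev) from by simp [pvStepB, h]]
      exact ih out prev
    · rw [if_neg h, show pvStepB (out, prev) t = (out ++ [pvToDict t], some t) from by simp [pvStepB, h]]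
      rw [ih (out ++ [pvToDict t]) (some t)]
      simp

theorem pvB_eq (items : List (List (String × String))) :
    normalize_single_exam_items_py_alt items
      = (pvDD none (PySem.List.sorted (pvTri items) pvKey3 false)).map pvToDict := by
  unfold normalize_single_exam_items_py_alt
  rw [pvB_tri items []]
  simp only [List.nil_append]
  rw [pvB_dd]
  simp

theorem pvDD_subset (l : List PvT) : ∀ (prev : Option PvT) (x : PvT), x ∈ pvDD prev l → x ∈ l := by
  induction l with
  | nil => intro prev x hx; simp [pvDD] at hx
  | cons t ts ih =>
    intro prev x hx
    simp only [pvDD] at hx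
    by_cases h : prev = some t
    · rw [if_pos h] at hx
      exact List.mem_cons_of_mem _ (ih prev x hx)
    · rw [if_neg h] at hx
      rcases List.mem_cons.mp hx with rfl | hx'
      · simp
      · exact List.mem_cons_of_mem _ (ih (some t) x hx')

theorem pvDD_mem (l : List PvT) : ∀ (prev : Option PvT) (x : PvT), x ∈ l →
    x ∈ pvDD prev l ∨ prev = some x := by
  induction l with
  | nil => intro prev x hx; simp at hx
  | cons t ts ih =>
    intro prev x hx
    simp only [pvDD]
    by_cases h : prev = some t
    · rw [if_pos h]
      rcases List.mem_cons.mp hx with rfl | hx'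
      · right; exact h
      · exact ih prev x hx'
    · rw [if_neg h]
      rcases List.mem_cons.mp hx with rfl | hx'
      · left; simp
      · rcases ih (some t) x hx' with hm | he
        · left; exact List.mem_cons_of_mem _ hm
        · left
          have hxt : x = t := (Option.some_inj.mp he).symm
          subst hxt
          exact List.mem_cons_self

theorem pvDD_pairwise (l : List PvT) (prev : Option PvT)
    (hl : l.Pairwise (fun a b => pvKey3 a ≤ pvKey3 b))
    (hprev : ∀ p, prev = some p → ∀ y ∈ l, pvKey3 p ≤ pvKey3 y) :
    (pvDD prev l).Pairwise (fun a b => pvKey3 a < pvKey3 b) ∧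
    ∀ x ∈ pvDD prev l, ∀ p, prev = some p → pvKey3 p < pvKey3 x := by
  induction l generalizing prev with
  | nil => simp [pvDD]
  | cons t ts ih =>
    rcases List.pairwise_cons.mp hl with ⟨hhead, htail⟩
    simp only [pvDD]
    by_cases h : prev = some t
    · rw [if_pos h]
      exact ih prev htail (fun p hp y hy => hprev p hp y (List.mem_cons_of_mem _ hy))
    · rw [if_neg h]
      have hlt : ∀ p, prev = some p → pvKey3 p < pvKey3 t := by
        intro p hp
        have hle := hprev p hp t (List.mem_cons_self)
        have hne : p ≠ t := by intro he; exact h (by rw [hp, he])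
        exact lt_of_le_of_ne hle (fun hk => hne (pvKey3_inj hk))
      have htri := ih (some t) htail (fun p hp y hy => (Option.some_inj.mp hp) ▸ hhead y hy)
      constructor
      · refine List.pairwise_cons.mpr ⟨?_, htri.1⟩
        intro x hx
        exact htri.2 x hx t rfl
      · intro x hx p hp
        rcases List.mem_cons.mp hx with rfl | hx'
        · exact hlt p hp
        · exact lt_trans (hlt p hp) (htri.2 x hx' t rfl)

theorem pvDD_nodup (l : List PvT) (h : (pvDD none l).Pairwise (fun a b => pvKey3 a < pvKey3 b)) :
    (pvDD none l).Nodup := by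
  refine List.Pairwise.imp ?_ h
  intro a b hab he
  rw [he] at hab
  exact lt_irrefl _ hab

-- ===== VERDICT (by name: the statement is the Claim_ definition above) =====
theorem normalize_single_exam_items_py_spec : Claim_equal_normalize_single_exam_items_py := by
  intro items _
  unfold Spec_normalize_single_exam_items_py
  rw [pvA_eq, pvB_eq]
  set tri := pvTri items with htri
  set st := PySem.List.sorted tri pvKey3 false with hst
  have hsp : st.Pairwise (fun a b => pvKey3 a ≤ pvKey3 b) := PySem.List.sorted_pairwise tri pvKey3
  have hdp := pvDD_pairwise st none hsp (by intro p hp; cases hp)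
  have hnd : (pvDD none st).Nodup := pvDD_nodup st hdp.1
  have hmem : ∀ x, x ∈ pvDD none st ↔ x ∈ PySem.Set.ofList tri := by
    intro x
    constructor
    · intro hx
      rw [PySem.Set.mem_ofList]
      have := pvDD_subset st none x hx
      rw [hst, PySem.List.mem_sorted] at this
      exact this
    · intro hx
      rw [PySem.Set.mem_ofList] at hx
      have hx' : x ∈ st := by rw [hst, PySem.List.mem_sorted]; exact hx
      rcases pvDD_mem st none x hx' with hm | he
      · exact hm
      · cases he
  have hperm : (pvDD none st).Perm (PySem.Set.ofList tri) :=
    (List.perm_ext_iff_of_nodup hnd (PySem.Set.nodup_ofList tri)).mpr hmem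
  have hpermD : ((pvDD none st).map pvToDict).Perm ((PySem.Set.ofList tri).map pvToDict) :=
    hperm.map pvToDict
  have hpwD : ((pvDD none st).map pvToDict).Pairwise (fun a b => pvKeyA a < pvKeyA b) := by
    rw [List.pairwise_map]
    refine List.Pairwise.imp ?_ hdp.1
    intro a b hab
    rw [pvKeyA_toDict, pvKeyA_toDict]
    exact hab
  exact PySem.List.sorted_eq_of_perm_of_pairwise_lt _ _ pvKeyA hpermD hpwD
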